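-- pv_equiv track=rewrite | github.com/dmi3ev1987/CodeWars | 6-kyu/a-rule-of-divisibility-by-13/a-rule-of-divisibility-by-13.py | thirt
-- ===== SOURCE A (Python) =====
-- def thirt(input_number):
--     pattern = [1, 10, 9, 12, 3, 4]
--     str_number = str(input_number)[::-1]
--     result = 0
--     patter_index = 0
--     for number in str_number:
--         result += int(number) * pattern[patter_index]
--         patter_index += 1
--         if patter_index == len(pattern):
--             patter_index = 0
--     if input_number != result:
--         return thirt(result)
--     return result
-- ===== SOURCE B (Python) =====
-- def thirt(input_number):
--     pattern = (1, 10, 9, 12, 3, 4)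
--
--     def weighted(n):
--         total, i = 0, 0
--         while n > 0:
--             total += (n % 10) * pattern[i % 6]
--             n //= 10
--             i += 1
--         return total
--
--     current = input_number
--     while True:
--         result = weighted(current)
--         if result == current:
--             return result
--         current = result
-- ===== Notes on version B (the rewrite author's own statement) =====
-- stated objective: alternative
-- what changed: Digits are extracted with arithmetic modulus and floor division instead of converting to a string, reversing it and calling int() per character, and the tail recursion is replaced by an explicit iterate-to-fixed-point while loop.
import Mathlib
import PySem

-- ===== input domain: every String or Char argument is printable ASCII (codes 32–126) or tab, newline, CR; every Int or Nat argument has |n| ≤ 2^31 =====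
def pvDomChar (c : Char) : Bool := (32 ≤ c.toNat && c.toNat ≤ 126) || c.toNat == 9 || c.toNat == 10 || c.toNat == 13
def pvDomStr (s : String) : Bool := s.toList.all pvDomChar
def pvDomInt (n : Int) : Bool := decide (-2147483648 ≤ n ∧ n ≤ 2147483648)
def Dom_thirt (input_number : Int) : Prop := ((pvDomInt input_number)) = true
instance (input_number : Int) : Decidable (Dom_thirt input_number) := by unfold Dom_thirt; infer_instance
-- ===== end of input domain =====

-- B replaces string conversion/reversal/per-char int() with divmod digit extraction and an
-- explicit iterate-to-fixed-point loop instead of tail recursion (objective: alternative).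


-- ===== PORT A =====
-- pattern = [1, 10, 9, 12, 3, 4]
def patternA : List Int := [1, 10, 9, 12, 3, 4]

-- the for-loop body over one character: state = (result, patter_index)
-- int(number) → PySem.Int.ofChars? (none = ValueError, excluded by Pre_; .getD 0 only totalises)
def thirtStepA (st : Int × Int) (number : Char) : Int × Int :=
  (st.1 + ((PySem.Int.ofChars? [number]).getD 0) * PySem.List.pyGetD patternA st.2 0,
   if st.2 + 1 = 6 then 0 else st.2 + 1)

-- one pass: str(input_number)[::-1] then the for-loop (slice [::-1] = list reverse)
def thirtPassA (input_number : Int) : Int :=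
  (List.foldl thirtStepA (0, 0) (PySem.Int.toChars input_number).reverse).1

-- the recursion 'if input_number != result: return thirt(result)', fuel only totalises
-- (never exhausted on inputs admitted by Pre_ within Dom)
def thirtGoA (fuel : Nat) (input_number : Int) : Int :=
  let result := thirtPassA input_number
  if input_number ≠ result then
    match fuel with
    | 0 => result
    | f + 1 => thirtGoA f result
  else result

def thirt (input_number : Int) : Int := thirtGoA (input_number.toNat + 2) input_number

-- ===== PORT B =====
def patternB : List Int := [1, 10, 9, 12, 3, 4]

-- while n > 0: total += (n % 10) * pattern[i % 6]; n //= 10; i += 1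
def thirtWeighted (n : Int) (total : Int) (i : Nat) : Int :=
  if h : 0 < n then
    thirtWeighted (PySem.Int.floordiv n 10)
      (total + PySem.Int.mod n 10 * PySem.List.pyGetD patternB ((i % 6 : Nat) : Int) 0)
      (i + 1)
  else total
termination_by n.toNat
decreasing_by
  have h10 : PySem.Int.floordiv n 10 = n / 10 := PySem.Int.floordiv_eq_ediv_of_pos (by omega)
  rw [h10]; omega

-- while True: result = weighted(current); if result == current: return result; current = result
-- (fuel only totalises; never exhausted on inputs admitted by Pre_ within Dom)
def thirtGoB (fuel : Nat) (current : Int) : Int :=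
  let result := thirtWeighted current 0 0
  if result = current then result
  else
    match fuel with
    | 0 => result
    | f + 1 => thirtGoB f result

def thirt_alt (input_number : Int) : Int := thirtGoB (input_number.toNat + 2) input_number

-- ===== PRECONDITION & SPEC =====
-- Pre_ excludes exactly the negative inputs: there str(input_number) contains '-', and A's
-- per-character int() raises ValueError.
def Pre_thirt (input_number : Int) : Prop := 0 ≤ input_number
instance (input_number : Int) : Decidable (Pre_thirt input_number) := by unfold Pre_thirt; infer_instance
def pvWitness_thirt : Int := (8529)

def Spec_thirt (input_number : Int) (out : Int) : Prop := out = thirt_alt input_number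
instance (input_number : Int) (out : Int) : Decidable (Spec_thirt input_number out) := by unfold Spec_thirt; infer_instance

-- ===== CLAIM (what is proved, stated in full; the proofs are below) =====
def Claim_equal_thirt : Prop := ∀ (input_number : Int), Dom_thirt input_number → Pre_thirt input_number → Spec_thirt input_number (thirt input_number)

-- ===== LEMMAS AND PROOFS =====

-- little-endian decimal digit characters of a Nat (proof-side model of str(n)[::-1] for n ≥ 0)
def led (m : Nat) : List Char :=
  Nat.digitChar (m % 10) :: (if h : m / 10 = 0 then [] else led (m / 10))
termination_by m
decreasing_by omega

lemma toDigitsCore_led : ∀ (f m : Nat) (acc : List Char), m < f →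
    Nat.toDigitsCore 10 f m acc = (led m).reverse ++ acc := by
  intro f
  induction f with
  | zero => omega
  | succ f ih =>
    intro m acc hm
    rw [Nat.toDigitsCore, led]
    by_cases h0 : m / 10 = 0
    · simp [h0]
    · rw [if_neg h0, dif_neg h0, ih (m / 10) _ (by omega)]
      simp

lemma toChars_reverse_eq_led (n : Int) (hn : 0 ≤ n) :
    (PySem.Int.toChars n).reverse = led n.toNat := by
  rw [PySem.Int.toChars, if_neg (by omega)]
  rw [Nat.toDigits, toDigitsCore_led (n.toNat + 1) n.toNat [] (by omega)]
  simp

lemma ofChars_digitChar (d : Nat) (hd : d < 10) :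
    (PySem.Int.ofChars? [Nat.digitChar d]).getD 0 = (d : Int) := by
  interval_cases d <;> decide

lemma pyGetD_pattern_eq (i : Nat) :
    PySem.List.pyGetD patternA ((i % 6 : Nat) : Int) 0 =
    PySem.List.pyGetD patternB ((i % 6 : Nat) : Int) 0 := rfl

-- the A-side fold over the little-endian digits equals B's divmod loop
lemma foldl_led_eq_weighted : ∀ (m : Nat) (acc : Int) (i : Nat),
    (List.foldl thirtStepA (acc, ((i % 6 : Nat) : Int)) (led m)).1 =
    thirtWeighted (m : Int) acc i := by
  intro m
  induction m using Nat.strong_induction_on with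
  | _ m ih =>
    intro acc i
    have h6 : i % 6 < 6 := Nat.mod_lt _ (by norm_num)
    have hidx : (if ((i % 6 : Nat) : Int) + 1 = 6 then (0 : Int) else ((i % 6 : Nat) : Int) + 1)
        = (((i + 1) % 6 : Nat) : Int) := by
      by_cases h : i % 6 = 5
      · rw [if_pos (by simp [h]), show (i+1) % 6 = 0 by omega]; simp
      · rw [if_neg (by push_cast; omega), show (i+1) % 6 = i % 6 + 1 by omega]; push_cast; ring
    have hval : ((PySem.Int.ofChars? [Nat.digitChar (m % 10)]).getD 0) = ((m % 10 : Nat) : Int) :=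
      ofChars_digitChar _ (Nat.mod_lt _ (by norm_num))
    by_cases hm : m = 0
    · subst hm
      rw [led]; simp [thirtStepA, hval]
      rw [thirtWeighted]; simp
    · have hpos : (0 : Int) < (m : Int) := by exact_mod_cast Nat.pos_of_ne_zero hm
      have hfd : PySem.Int.floordiv (m : Int) 10 = ((m / 10 : Nat) : Int) := by
        exact_mod_cast PySem.Int.floordiv_natCast m 10
      have hmod : PySem.Int.mod (m : Int) 10 = ((m % 10 : Nat) : Int) := by
        exact_mod_cast PySem.Int.mod_natCast m 10
      rw [led, thirtWeighted, dif_pos hpos, hfd, hmod, ← pyGetD_pattern_eq]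
      by_cases h0 : m / 10 = 0
      · rw [dif_pos h0, h0]
        simp only [List.foldl_cons, List.foldl_nil, thirtStepA, hval, hidx]
        rw [thirtWeighted]; simp
      · rw [dif_neg h0]
        simp only [List.foldl_cons, thirtStepA, hval, hidx]
        exact ih (m / 10) (by omega) _ (i + 1)

lemma passA_eq_weighted (n : Int) (hn : 0 ≤ n) :
    thirtPassA n = thirtWeighted n 0 0 := by
  rw [thirtPassA, toChars_reverse_eq_led n hn]
  have := foldl_led_eq_weighted n.toNat 0 0
  simpa [Int.toNat_of_nonneg hn] using this

lemma weighted_nonneg : ∀ (n acc : Int) (i : Nat), 0 ≤ acc → 0 ≤ thirtWeighted n acc i := by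
  intro n acc i
  induction n, acc, i using thirtWeighted.induct with
  | case1 n total i hpos ih =>
    intro hacc
    rw [thirtWeighted, dif_pos hpos]
    refine ih ?_
    have h1 : 0 ≤ PySem.Int.mod n 10 := PySem.Int.mod_nonneg n (by norm_num)
    have h2 : 0 ≤ PySem.List.pyGetD patternB ((i % 6 : Nat) : Int) 0 := by
      have h6 : i % 6 < 6 := Nat.mod_lt _ (by norm_num)
      interval_cases h : (i % 6) <;> decide
    positivity
  | case2 n total i hpos =>
    intro hacc
    rw [thirtWeighted, dif_neg hpos]; exact hacc

lemma goA_eq_goB : ∀ (fuel : Nat) (cur : Int), 0 ≤ cur → thirtGoA fuel cur = thirtGoB fuel cur := by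
  intro fuel
  induction fuel with
  | zero =>
    intro cur hcur
    rw [thirtGoA, thirtGoB, passA_eq_weighted cur hcur]
    by_cases h : thirtWeighted cur 0 0 = cur <;> simp [h]
  | succ f ih =>
    intro cur hcur
    rw [thirtGoA, thirtGoB, passA_eq_weighted cur hcur]
    by_cases h : thirtWeighted cur 0 0 = cur
    · simp [h]
    · rw [if_neg h, if_pos (show ¬cur = thirtWeighted cur 0 0 from fun hc => h hc.symm)]
      exact ih _ (weighted_nonneg cur 0 0 le_rfl)

-- ===== VERDICT (by name: the statement is the Claim_ definition above) =====
theorem thirt_spec : Claim_equal_thirt := by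
  intro n _ hpre
  unfold Spec_thirt thirt thirt_alt
  exact goA_eq_goB _ n hpre
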